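-- pv_equiv track=rewrite | github.com/pnowakowski-gl/python_talent_engine | 33_flattenAndZipNestedList.py | flat_zip
-- ===== SOURCE A (Python) =====
-- from itertools import zip_longest
--
-- def flat_zip(list1, list2):
--     a = list(zip_longest(list1, list2))
--     return [
--         element
--         for i in list(zip_longest(list1, list2))
--         for element in i
--         if element is not None
--     ]
-- ===== SOURCE B (Python) =====
-- def flat_zip(list1, list2):
--     tagged = [(2 * i, x) for i, x in enumerate(list1) if x is not None]
--     tagged += [(2 * i + 1, y) for i, y in enumerate(list2) if y is not None]
--     tagged.sort(key=lambda t: t[0])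
--     return [v for _, v in tagged]
-- ===== Notes on version B (the rewrite author's own statement) =====
-- stated objective: alternative
-- what changed: Replaces the zip_longest padded-tuple comprehension with decorate-sort-undecorate: tag each surviving element of list1 with key 2*i and of list2 with 2*i+1, sort the concatenated tagged list by key, and strip the tags; the distinct keys reproduce the exact interleaved order.
import Mathlib
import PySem

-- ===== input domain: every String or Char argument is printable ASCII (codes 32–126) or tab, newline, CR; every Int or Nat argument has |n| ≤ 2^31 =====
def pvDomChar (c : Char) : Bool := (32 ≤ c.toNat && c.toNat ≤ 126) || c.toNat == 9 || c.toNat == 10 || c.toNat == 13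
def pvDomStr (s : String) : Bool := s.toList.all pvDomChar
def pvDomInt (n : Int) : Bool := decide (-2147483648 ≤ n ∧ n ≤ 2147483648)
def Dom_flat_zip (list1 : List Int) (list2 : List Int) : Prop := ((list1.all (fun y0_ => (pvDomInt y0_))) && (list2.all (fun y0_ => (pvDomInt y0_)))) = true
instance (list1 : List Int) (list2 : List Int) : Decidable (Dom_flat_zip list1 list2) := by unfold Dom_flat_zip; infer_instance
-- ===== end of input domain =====

-- B replaces the zip_longest padded-tuple comprehension by decorate-sort-undecorate:
-- tag list1 elements with key 2*i and list2 elements with 2*i+1, sort by key, strip tags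
-- (objective: alternative algorithm, same result).


-- ===== PORT A =====
-- zip_longest(list1, list2): pad the shorter list with None (Option Int, none = None)
def zipLongest : List Int → List Int → List (Option Int × Option Int)
  | [], [] => []
  | x :: xs, [] => (some x, none) :: zipLongest xs []
  | [], y :: ys => (none, some y) :: zipLongest [] ys
  | x :: xs, y :: ys => (some x, some y) :: zipLongest xs ys

-- [element for i in list(zip_longest(..)) for element in i if element is not None]
-- (the unused 'a = list(zip_longest(list1, list2))' binding is kept as _a)
def flat_zip (list1 : List Int) (list2 : List Int) : List Int :=
  let _a := zipLongest list1 list2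
  (zipLongest list1 list2).flatMap (fun i => ([i.1, i.2]).filterMap (fun e => e))

-- ===== PORT B =====
-- tagged = [(2*i, x) …] + [(2*i+1, y) …]; 'x is not None' is always true for Int
-- elements, so the comprehension filter keeps everything; tagged.sort(key=fst); strip tags
def flat_zip_alt (list1 : List Int) (list2 : List Int) : List Int :=
  let tagged : List (Int × Int) :=
    (PySem.List.enumerate list1).map (fun p => (2 * p.1, p.2)) ++
    (PySem.List.enumerate list2).map (fun p => (2 * p.1 + 1, p.2))
  (PySem.List.sorted tagged (fun t => t.1) false).map (fun t => t.2)

-- ===== PRECONDITION & SPEC =====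
def Spec_flat_zip (list1 : List Int) (list2 : List Int) (out : List Int) : Prop := out = flat_zip_alt list1 list2
instance (list1 : List Int) (list2 : List Int) (out : List Int) : Decidable (Spec_flat_zip list1 list2 out) := by unfold Spec_flat_zip; infer_instance

-- ===== CLAIM (what is proved, stated in full; the proofs are below) =====
def Claim_equal_flat_zip : Prop := ∀ (list1 : List Int) (list2 : List Int), Dom_flat_zip list1 list2 → Spec_flat_zip list1 list2 (flat_zip list1 list2)

-- ===== LEMMAS AND PROOFS =====

-- the decorated interleaving: what sorting B's tagged list must produce
def interT : Int → List Int → List Int → List (Int × Int)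
  | _, [], [] => []
  | n, x :: xs, [] => (2 * n, x) :: interT (n + 1) xs []
  | n, [], y :: ys => (2 * n + 1, y) :: interT (n + 1) [] ys
  | n, x :: xs, y :: ys => (2 * n, x) :: (2 * n + 1, y) :: interT (n + 1) xs ys

lemma interT_key_lb (n : Int) (l1 l2 : List Int) :
    ∀ p ∈ interT n l1 l2, 2 * n ≤ p.1 := by
  induction l1 generalizing n l2 with
  | nil =>
    induction l2 generalizing n with
    | nil => simp [interT]
    | cons y ys ih =>
      intro p hp
      simp only [interT, List.mem_cons] at hp
      rcases hp with h | h
      · subst h; omega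
      · have := ih (n + 1) p h; omega
  | cons x xs ih =>
    intro p hp
    cases l2 with
    | nil =>
      simp only [interT, List.mem_cons] at hp
      rcases hp with h | h
      · subst h; omega
      · have := ih (n + 1) [] p h; omega
    | cons y ys =>
      simp only [interT, List.mem_cons] at hp
      rcases hp with h | h | h
      · subst h; omega
      · subst h; omega
      · have := ih (n + 1) ys p h; omega

lemma interT_pairwise (n : Int) (l1 l2 : List Int) :
    (interT n l1 l2).Pairwise (fun a b => a.1 < b.1) := by
  induction l1 generalizing n l2 with
  | nil =>
    induction l2 generalizing n with
    | nil => simp [interT]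
    | cons y ys ih =>
      rw [interT]
      refine List.Pairwise.cons ?_ (ih (n + 1))
      intro p hp; have := interT_key_lb (n + 1) [] ys p hp; simp; omega
  | cons x xs ih =>
    cases l2 with
    | nil =>
      rw [interT]
      refine List.Pairwise.cons ?_ (ih (n + 1) [])
      intro p hp; have := interT_key_lb (n + 1) xs [] p hp; simp; omega
    | cons y ys =>
      rw [interT]
      refine List.Pairwise.cons ?_ (List.Pairwise.cons ?_ (ih (n + 1) ys))
      · intro p hp
        simp only [List.mem_cons] at hp
        rcases hp with h | h
        · subst h; show (2*_ : Int) < 2*_+1; omega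
        · have := interT_key_lb (n + 1) xs ys p h; simp; omega
      · intro p hp; have := interT_key_lb (n + 1) xs ys p hp; simp; omega

lemma interT_perm (n : Int) (l1 l2 : List Int) :
    (interT n l1 l2).Perm
      ((PySem.List.enumerate l1 n).map (fun p => (2 * p.1, p.2)) ++
       (PySem.List.enumerate l2 n).map (fun p => (2 * p.1 + 1, p.2))) := by
  induction l1 generalizing n l2 with
  | nil =>
    induction l2 generalizing n with
    | nil => simp [interT, PySem.List.enumerate_nil]
    | cons y ys ih =>
      simpa [interT, PySem.List.enumerate_nil, PySem.List.enumerate_cons]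
        using (ih (n + 1)).cons (2 * n + 1, y)
  | cons x xs ih =>
    cases l2 with
    | nil =>
      simpa [interT, PySem.List.enumerate_nil, PySem.List.enumerate_cons]
        using (ih (n + 1) []).cons (2 * n, x)
    | cons y ys =>
      have h := ((ih (n + 1) ys).cons (2 * n + 1, y)).trans
        (List.perm_middle (a := (2 * n + 1, y))
          (l₁ := (PySem.List.enumerate xs (n + 1)).map (fun p => (2 * p.1, p.2)))
          (l₂ := (PySem.List.enumerate ys (n + 1)).map (fun p => (2 * p.1 + 1, p.2)))).symm
      simpa [interT, PySem.List.enumerate_cons] using h.cons (2 * n, x)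

-- the plain interleaving: what A computes and what stripping interT's tags gives
def interA : List Int → List Int → List Int
  | [], [] => []
  | x :: xs, [] => x :: interA xs []
  | [], y :: ys => y :: interA [] ys
  | x :: xs, y :: ys => x :: y :: interA xs ys

lemma interT_map_snd (n : Int) (l1 l2 : List Int) :
    (interT n l1 l2).map (fun t => t.2) = interA l1 l2 := by
  induction l1 generalizing n l2 with
  | nil =>
    induction l2 generalizing n with
    | nil => simp [interT, interA]
    | cons y ys ih => simpa [interT, interA] using ih (n + 1)
  | cons x xs ih =>
    cases l2 with
    | nil => simpa [interT, interA] using ih (n + 1) []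
    | cons y ys => simpa [interT, interA] using ih (n + 1) ys

lemma flat_zip_eq_interA (l1 l2 : List Int) : flat_zip l1 l2 = interA l1 l2 := by
  induction l1 generalizing l2 with
  | nil =>
    induction l2 with
    | nil => simp [flat_zip, zipLongest, interA]
    | cons y ys ih => simpa [flat_zip, zipLongest, interA] using ih
  | cons x xs ih =>
    cases l2 with
    | nil => simpa [flat_zip, zipLongest, interA] using ih []
    | cons y ys => simpa [flat_zip, zipLongest, interA] using ih ys

lemma flat_zip_alt_eq_interA (l1 l2 : List Int) : flat_zip_alt l1 l2 = interA l1 l2 := by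
  show (PySem.List.sorted
      ((PySem.List.enumerate l1).map (fun p => (2 * p.1, p.2)) ++
       (PySem.List.enumerate l2).map (fun p => (2 * p.1 + 1, p.2))) (fun t => t.1) false).map (fun t => t.2) = interA l1 l2
  have hs := PySem.List.sorted_eq_of_perm_of_pairwise_lt
    (xs := (PySem.List.enumerate l1).map (fun p => (2 * p.1, p.2)) ++
           (PySem.List.enumerate l2).map (fun p => (2 * p.1 + 1, p.2)))
    (ys := interT 0 l1 l2) (key := fun t => t.1)
    (interT_perm 0 l1 l2) (interT_pairwise 0 l1 l2)
  rw [hs, interT_map_snd]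

-- ===== VERDICT (by name: the statement is the Claim_ definition above) =====
theorem flat_zip_spec : Claim_equal_flat_zip := by
  intro l1 l2 _
  unfold Spec_flat_zip
  rw [flat_zip_eq_interA, flat_zip_alt_eq_interA]
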